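-- pv_equiv track=rewrite | github.com/viktor-krasikov/m763 | lesson3/tasks.py | Marbaev_Hagoev_Panteleev_2
-- ===== SOURCE A (Python) =====
-- def Marbaev_Hagoev_Panteleev_2(A):
--     # TODO переименовать функцию в can_not_step_up(matr)
--     # TODO в начале выполнения функции вывести в консоль имя этой функции и фамилии авторов функции
--     i1 = j1 = 0
--     max_elem = A[i1][j1]
--
--     for i in range(len(A)):
--         for j in range(len(A[i])):
--             if max_elem < A[i][j]:
--                 max_elem = A[i][j]
--                 i1, j1 = i, j
--
--     return i1 != 0 and A[i1 - 1][j1] == max_elem - 1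
-- ===== SOURCE B (Python) =====
-- def Marbaev_Hagoev_Panteleev_2(A):
--     # Two-pass decomposition: first compute the maximum value (seeded with
--     # A[0][0], so the same IndexError as A on empty input), then locate the
--     # first row-major occurrence of that maximum and test the cell above it.
--     max_val = A[0][0]
--     for row in A:
--         for x in row:
--             if max_val < x:
--                 max_val = x
--     for i, row in enumerate(A):
--         for j, x in enumerate(row):
--             if x == max_val:
--                 return i != 0 and A[i - 1][j] == max_val - 1
-- ===== Notes on version B (the rewrite author's own statement) =====
-- stated objective: alternative
-- what changed: A fuses max-finding and position tracking into one scan with mutable argmax state; B decomposes into two passes: a pure max-value pass, then a row-major search for the first occurrence of the maximum, returning directly from inside that search.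
import Mathlib
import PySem

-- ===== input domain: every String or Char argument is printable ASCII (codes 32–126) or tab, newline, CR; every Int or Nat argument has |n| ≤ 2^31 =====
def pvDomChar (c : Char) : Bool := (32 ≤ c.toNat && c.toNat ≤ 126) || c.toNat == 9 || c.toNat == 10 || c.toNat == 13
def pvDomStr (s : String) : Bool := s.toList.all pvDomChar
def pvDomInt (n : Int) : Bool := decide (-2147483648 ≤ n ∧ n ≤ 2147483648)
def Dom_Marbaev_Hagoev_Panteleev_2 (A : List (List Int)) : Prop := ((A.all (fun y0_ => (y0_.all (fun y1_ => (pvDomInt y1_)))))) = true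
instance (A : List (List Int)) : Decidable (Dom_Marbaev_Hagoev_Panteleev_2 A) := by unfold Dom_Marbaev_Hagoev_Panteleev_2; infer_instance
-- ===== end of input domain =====

-- B is an alternative decomposition of A (two passes — max value, then first row-major
-- location of it — instead of A's fused argmax scan); same cost, same Bool on Pre_.

-- ===== PORT A =====
-- Transliteration of A's fused scan: state (i1, j1, max_elem), nested loops over
-- range(len(A)) / range(len(A[i])).  All indices used are nonnegative and (under Pre_)
-- in range, so List.getD is exact for Python's indexing; outside Pre_ Python raises
-- IndexError (on A[0][0] or on the final A[i1-1][j1]).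
def Marbaev_Hagoev_Panteleev_2 (A : List (List Int)) : Bool :=
  let max0 : Int := (A.getD 0 []).getD 0 0   -- A[i1][j1] with i1 = j1 = 0
  let s : Nat × Nat × Int :=
    (List.range A.length).foldl (fun s i =>
      (List.range (A.getD i []).length).foldl (fun s j =>
        if s.2.2 < (A.getD i []).getD j 0 then (i, j, (A.getD i []).getD j 0) else s) s)
      (0, 0, max0)
  (s.1 != 0) && ((A.getD (s.1 - 1) []).getD s.2.1 0 == s.2.2 - 1)

-- ===== PORT B =====
-- first pass of Source B: plain maximum of all entries, seeded with A[0][0]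
def pvMaxPass (m : Int) (rows : List (List Int)) : Int :=
  rows.foldl (fun acc row => row.foldl (fun a x => if a < x then x else a) acc) m

-- second pass of Source B: first row-major position whose value equals m (the early return)
def pvLocRow (m : Int) (j : Nat) : List Int → Option Nat
  | [] => none
  | x :: xs => if x == m then some j else pvLocRow m (j + 1) xs

def pvLoc (m : Int) (i : Nat) : List (List Int) → Option (Nat × Nat)
  | [] => none
  | r :: rs =>
    match pvLocRow m 0 r with
    | some j => some (i, j)
    | none => pvLoc m (i + 1) rs

def Marbaev_Hagoev_Panteleev_2_alt (A : List (List Int)) : Bool :=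
  let m := pvMaxPass ((A.headD []).headD 0) A
  match pvLoc m 0 A with
  | some (i, j) => (i != 0) && ((A.getD (i - 1) []).getD j 0 == m - 1)
  | none => false   -- unreachable under Pre_ (Python B falls off the loop only when A has no entries)

-- ===== PRECONDITION & SPEC =====
-- Pre_ excludes exactly the inputs where Python A raises IndexError: the empty matrix and
-- the empty first row (the initial A[0][0] access), and matrices whose first row-major
-- maximum position (i, j) has i > 0 but row i-1 shorter than j+1 (the final A[i1-1][j1]
-- access).  Python B raises on exactly the same inputs.  The third clause is needed only
-- for that exclusion: the Lean ports (which read missing cells as 0 via getD) agree on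
-- every A whose first two clauses hold.
def Pre_Marbaev_Hagoev_Panteleev_2 (A : List (List Int)) : Prop :=
  A ≠ [] ∧ A.headD [] ≠ [] ∧
  ∀ i ∈ List.range A.length, ∀ j ∈ List.range (A.getD i []).length,
    (0 < i ∧
     (∀ p ∈ List.range A.length, ∀ q ∈ List.range (A.getD p []).length,
        (A.getD p []).getD q 0 ≤ (A.getD i []).getD j 0) ∧
     (∀ p ∈ List.range A.length, ∀ q ∈ List.range (A.getD p []).length,
        (p < i ∨ (p = i ∧ q < j)) → (A.getD p []).getD q 0 < (A.getD i []).getD j 0)) →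
    j < (A.getD (i - 1) []).length
instance (A : List (List Int)) : Decidable (Pre_Marbaev_Hagoev_Panteleev_2 A) := by
  unfold Pre_Marbaev_Hagoev_Panteleev_2; infer_instance

def pvWitness_Marbaev_Hagoev_Panteleev_2 : List (List Int) := [[1, 2], [4, 3]]

def Spec_Marbaev_Hagoev_Panteleev_2 (A : List (List Int)) (out : Bool) : Prop := out = Marbaev_Hagoev_Panteleev_2_alt A
instance (A : List (List Int)) (out : Bool) : Decidable (Spec_Marbaev_Hagoev_Panteleev_2 A out) := by unfold Spec_Marbaev_Hagoev_Panteleev_2; infer_instance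

-- ===== CLAIM (what is proved, stated in full; the proofs are below) =====
def Claim_equal_Marbaev_Hagoev_Panteleev_2 : Prop := ∀ (A : List (List Int)), Dom_Marbaev_Hagoev_Panteleev_2 A → Pre_Marbaev_Hagoev_Panteleev_2 A → Spec_Marbaev_Hagoev_Panteleev_2 A (Marbaev_Hagoev_Panteleev_2 A)

-- ===== LEMMAS AND PROOFS =====

-- A's update step, seen over (row index, column index, value) triples
def pvStep (s t : Nat × Nat × Int) : Nat × Nat × Int := if s.2.2 < t.2.2 then t else s

-- the row-major (i, j, value) triples of a matrix, with starting indices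
def pvRowTriples (i : Nat) (j : Nat) : List Int → List (Nat × Nat × Int)
  | [] => []
  | x :: xs => (i, j, x) :: pvRowTriples i (j + 1) xs

def pvTriples (i : Nat) : List (List Int) → List (Nat × Nat × Int)
  | [] => []
  | r :: rs => pvRowTriples i 0 r ++ pvTriples (i + 1) rs

def pvMaxT (a : Int) (ts : List (Nat × Nat × Int)) : Int :=
  ts.foldl (fun a t => if a < t.2.2 then t.2.2 else a) a

def pvFindFirst (v : Int) : List (Nat × Nat × Int) → Option (Nat × Nat)
  | [] => none
  | t :: ts => if t.2.2 = v then some (t.1, t.2.1) else pvFindFirst v ts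

lemma pvRowTriples_foldl (f : (Nat × Nat × Int) → (Nat × Nat × Int) → (Nat × Nat × Int)) :
    ∀ (row : List Int) (i j : Nat) (s : Nat × Nat × Int),
    (pvRowTriples i j row).foldl f s =
      (List.range row.length).foldl (fun s k => f s (i, j + k, row.getD k 0)) s := by
  intro row
  induction row with
  | nil => intro i j s; simp [pvRowTriples]
  | cons x xs ih =>
    intro i j s
    have hfun : (fun (s : Nat × Nat × Int) (k : Nat) => f s (i, j + (k + 1), (x :: xs).getD (k + 1) 0))
        = (fun s k => f s (i, (j + 1) + k, xs.getD k 0)) := by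
      funext s k
      have : j + (k + 1) = (j + 1) + k := by omega
      rw [this, List.getD_cons_succ]
    simp only [pvRowTriples, List.foldl_cons, List.length_cons,
      List.range_succ_eq_map, List.foldl_map, Nat.succ_eq_add_one, hfun,
      List.getD_cons_zero, Nat.add_zero]
    exact ih i (j + 1) (f s (i, j, x))

lemma pvTriples_foldl (f : (Nat × Nat × Int) → (Nat × Nat × Int) → (Nat × Nat × Int)) :
    ∀ (rows : List (List Int)) (i : Nat) (s : Nat × Nat × Int),
    (pvTriples i rows).foldl f s =
      (List.range rows.length).foldl (fun s k =>
        (List.range (rows.getD k []).length).foldl (fun s q => f s (i + k, q, (rows.getD k []).getD q 0)) s) s := by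
  intro rows
  induction rows with
  | nil => intro i s; simp [pvTriples]
  | cons r rs ih =>
    intro i s
    have hfun : (fun (s : Nat × Nat × Int) (k : Nat) =>
          (List.range ((r :: rs).getD (k + 1) []).length).foldl
            (fun s q => f s (i + (k + 1), q, ((r :: rs).getD (k + 1) []).getD q 0)) s)
        = (fun s k => (List.range (rs.getD k []).length).foldl
            (fun s q => f s ((i + 1) + k, q, (rs.getD k []).getD q 0)) s) := by
      funext s k
      have : i + (k + 1) = (i + 1) + k := by omega
      rw [List.getD_cons_succ, this]
    simp only [pvTriples, List.foldl_append, List.length_cons,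
      List.range_succ_eq_map, List.foldl_map, Nat.succ_eq_add_one, hfun,
      List.getD_cons_zero, Nat.add_zero, List.foldl_cons]
    rw [ih (i + 1), pvRowTriples_foldl]
    simp

lemma pvMaxT_cons (a : Int) (t : Nat × Nat × Int) (ts : List (Nat × Nat × Int)) :
    pvMaxT a (t :: ts) = pvMaxT (if a < t.2.2 then t.2.2 else a) ts := by
  simp [pvMaxT]

lemma le_pvMaxT : ∀ (ts : List (Nat × Nat × Int)) (a : Int), a ≤ pvMaxT a ts := by
  intro ts
  induction ts with
  | nil => intro a; simp [pvMaxT]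
  | cons t ts ih =>
    intro a
    rw [pvMaxT_cons]
    have h1 := ih (if a < t.2.2 then t.2.2 else a)
    by_cases h : a < t.2.2
    · rw [if_pos h] at h1 ⊢; omega
    · rwa [if_neg h] at h1 ⊢

-- if the max fold strictly improves on the seed, its value occurs in the list
lemma pvFindFirst_isSome : ∀ (ts : List (Nat × Nat × Int)) (a : Int),
    a < pvMaxT a ts → (pvFindFirst (pvMaxT a ts) ts).isSome := by
  intro ts
  induction ts with
  | nil => intro a h; simp [pvMaxT] at h
  | cons t ts ih =>
    intro a h
    rw [pvMaxT_cons] at h ⊢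
    by_cases hx : t.2.2 = pvMaxT (if a < t.2.2 then t.2.2 else a) ts
    · simp only [pvFindFirst]; rw [if_pos hx]; simp
    · have hle := le_pvMaxT ts (if a < t.2.2 then t.2.2 else a)
      have h2 : (if a < t.2.2 then t.2.2 else a) < pvMaxT (if a < t.2.2 then t.2.2 else a) ts := by
        by_cases hc : a < t.2.2
        · rw [if_pos hc] at hle hx ⊢
          rcases lt_or_eq_of_le hle with h3 | h3
          · exact h3
          · exact absurd h3 hx
        · rw [if_neg hc] at hle h ⊢
          exact h
      have h4 := ih _ h2
      simpa [pvFindFirst, hx] using h4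

-- the characterisation of A's fused scan: it ends at the first row-major occurrence of
-- the overall maximum, provided the maximum improves on the seed (else it stays put)
lemma pvStep_char : ∀ (ts : List (Nat × Nat × Int)) (s : Nat × Nat × Int),
    ts.foldl pvStep s =
      (if s.2.2 < pvMaxT s.2.2 ts then
        (match pvFindFirst (pvMaxT s.2.2 ts) ts with
         | some p => (p.1, p.2, pvMaxT s.2.2 ts)
         | none => s)
       else s) := by
  intro ts
  induction ts with
  | nil => intro s; simp [pvMaxT]
  | cons t ts ih =>
    intro s
    by_cases hc : s.2.2 < t.2.2
    · have hstep : pvStep s t = t := by simp [pvStep, hc]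
      rw [List.foldl_cons, hstep, ih t, pvMaxT_cons, if_pos hc]
      have hle : t.2.2 ≤ pvMaxT t.2.2 ts := le_pvMaxT ts t.2.2
      by_cases h2 : t.2.2 < pvMaxT t.2.2 ts
      · have hne : t.2.2 ≠ pvMaxT t.2.2 ts := by omega
        have hs : s.2.2 < pvMaxT t.2.2 ts := by omega
        have hsome := pvFindFirst_isSome ts t.2.2 h2
        rw [if_pos h2, if_pos hs]
        show _ = (match pvFindFirst (pvMaxT t.2.2 ts) (t :: ts) with
          | some p => (p.1, p.2, pvMaxT t.2.2 ts) | none => s)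
        rw [show pvFindFirst (pvMaxT t.2.2 ts) (t :: ts) = pvFindFirst (pvMaxT t.2.2 ts) ts by
          simp [pvFindFirst, hne]]
        cases hfind : pvFindFirst (pvMaxT t.2.2 ts) ts with
        | none => rw [hfind] at hsome; simp at hsome
        | some p => simp
      · have heq : pvMaxT t.2.2 ts = t.2.2 := le_antisymm (by omega) hle
        rw [if_neg h2, heq, if_pos hc]
        show t = (match pvFindFirst t.2.2 (t :: ts) with
          | some p => (p.1, p.2, t.2.2) | none => s)
        simp [pvFindFirst]
    · have hstep : pvStep s t = s := by simp [pvStep, hc]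
      have hmx : pvMaxT s.2.2 (t :: ts) = pvMaxT s.2.2 ts := by
        rw [pvMaxT_cons, if_neg hc]
      rw [List.foldl_cons, hstep, ih s, hmx]
      by_cases h2 : s.2.2 < pvMaxT s.2.2 ts
      · have hne : t.2.2 ≠ pvMaxT s.2.2 ts := by omega
        rw [if_pos h2, if_pos h2]
        rw [show pvFindFirst (pvMaxT s.2.2 ts) (t :: ts) = pvFindFirst (pvMaxT s.2.2 ts) ts by
          simp [pvFindFirst, hne]]
      · rw [if_neg h2, if_neg h2]

-- B's max pass equals the triple max fold
lemma pvMaxT_row : ∀ (row : List Int) (i j : Nat) (m : Int),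
    pvMaxT m (pvRowTriples i j row) = row.foldl (fun a x => if a < x then x else a) m := by
  intro row
  induction row with
  | nil => intro i j m; simp [pvRowTriples, pvMaxT]
  | cons x xs ih =>
    intro i j m
    rw [pvRowTriples, pvMaxT_cons, ih, List.foldl_cons]

lemma pvMaxT_append (a : Int) (ts us : List (Nat × Nat × Int)) :
    pvMaxT a (ts ++ us) = pvMaxT (pvMaxT a ts) us := by
  simp [pvMaxT]

lemma pvMaxPass_eq : ∀ (rows : List (List Int)) (i : Nat) (m : Int),
    pvMaxT m (pvTriples i rows) = pvMaxPass m rows := by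
  intro rows
  induction rows with
  | nil => intro i m; simp [pvTriples, pvMaxT, pvMaxPass]
  | cons r rs ih =>
    intro i m
    rw [pvTriples, pvMaxT_append, pvMaxT_row, ih]
    simp [pvMaxPass]

-- B's locate pass equals first-occurrence search over the triples
lemma pvLocRow_eq : ∀ (row : List Int) (m : Int) (i j : Nat),
    pvFindFirst m (pvRowTriples i j row) = (pvLocRow m j row).map (fun q => (i, q)) := by
  intro row
  induction row with
  | nil => intro m i j; simp [pvRowTriples, pvLocRow, pvFindFirst]
  | cons x xs ih =>
    intro m i j
    simp only [pvRowTriples, pvLocRow, pvFindFirst]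
    by_cases h : x = m
    · simp [h]
    · simp [h, ih]

lemma pvFindFirst_append (v : Int) : ∀ (ts us : List (Nat × Nat × Int)),
    pvFindFirst v (ts ++ us) = ((pvFindFirst v ts).or (pvFindFirst v us)) := by
  intro ts us
  induction ts with
  | nil => simp [pvFindFirst]
  | cons t ts ih =>
    simp only [List.cons_append, pvFindFirst]
    by_cases h : t.2.2 = v <;> simp [h, ih]

lemma pvLoc_eq : ∀ (rows : List (List Int)) (m : Int) (i : Nat),
    pvFindFirst m (pvTriples i rows) = pvLoc m i rows := by
  intro rows
  induction rows with
  | nil => intro m i; simp [pvTriples, pvFindFirst, pvLoc]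
  | cons r rs ih =>
    intro m i
    simp only [pvTriples, pvLoc, pvFindFirst_append, pvLocRow_eq, ih]
    cases pvLocRow m 0 r <;> simp

-- the equivalence on every input whose first row exists and is nonempty
theorem pv_main (A : List (List Int)) (h1 : A ≠ []) (h2 : A.headD [] ≠ []) :
    Marbaev_Hagoev_Panteleev_2 A = Marbaev_Hagoev_Panteleev_2_alt A := by
  obtain ⟨r0, rest, rfl⟩ : ∃ r0 rest, A = r0 :: rest := by
    cases A with
    | nil => exact absurd rfl h1
    | cons a b => exact ⟨a, b, rfl⟩
  obtain ⟨x0, xs, rfl⟩ : ∃ x0 xs, r0 = x0 :: xs := by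
    cases r0 with
    | nil => simp at h2
    | cons a b => exact ⟨a, b, rfl⟩
  set A := (x0 :: xs) :: rest with hA
  have hseed : (A.getD 0 []).getD 0 0 = x0 := by simp [hA]
  have hseed' : (A.headD []).headD 0 = x0 := by simp [hA]
  -- rewrite A's nested range fold as a fold over the triples
  have hfold : (List.range A.length).foldl (fun s i =>
      (List.range (A.getD i []).length).foldl (fun s j =>
        if s.2.2 < (A.getD i []).getD j 0 then (i, j, (A.getD i []).getD j 0) else s) s)
      ((0, 0, x0) : Nat × Nat × Int) = (pvTriples 0 A).foldl pvStep (0, 0, x0) := by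
    rw [pvTriples_foldl pvStep]
    simp [pvStep]
  set M := pvMaxT x0 (pvTriples 0 A) with hMdef
  have hx0le : x0 ≤ M := le_pvMaxT _ _
  have hhead : pvTriples 0 A = (0, 0, x0) :: (pvRowTriples 0 1 xs ++ pvTriples 1 rest) := by
    simp [hA, pvTriples, pvRowTriples]
  have hchar := pvStep_char (pvTriples 0 A) (0, 0, x0)
  have hfind : ∃ p, pvFindFirst M (pvTriples 0 A) = some p ∧
      (pvTriples 0 A).foldl pvStep (0, 0, x0) = (p.1, p.2, M) := by
    by_cases hlt : x0 < M
    · have hsome := pvFindFirst_isSome (pvTriples 0 A) x0 (by rw [← hMdef]; exact hlt)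
      rw [← hMdef] at hsome
      cases hf : pvFindFirst M (pvTriples 0 A) with
      | none => rw [hf] at hsome; simp at hsome
      | some p =>
        refine ⟨p, rfl, ?_⟩
        rw [hchar]
        simp only [← hMdef]
        rw [if_pos hlt, hf]
    · have hMeq : M = x0 := le_antisymm (by omega) hx0le
      refine ⟨(0, 0), ?_, ?_⟩
      · rw [hhead]; simp [pvFindFirst, hMeq]
      · rw [hchar]
        simp only [← hMdef]
        rw [if_neg hlt, hMeq]
  obtain ⟨p, hp, hres⟩ := hfind
  have hMP : pvMaxPass x0 A = M := by rw [hMdef, pvMaxPass_eq _ 0]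
  have hLoc : pvLoc M 0 A = some p := by rw [← pvLoc_eq, hp]
  show Marbaev_Hagoev_Panteleev_2 A = Marbaev_Hagoev_Panteleev_2_alt A
  simp only [Marbaev_Hagoev_Panteleev_2, Marbaev_Hagoev_Panteleev_2_alt, hseed, hseed',
    hfold, hres, hMP, hLoc]

-- ===== VERDICT (by name: the statement is the Claim_ definition above) =====
theorem Marbaev_Hagoev_Panteleev_2_spec : Claim_equal_Marbaev_Hagoev_Panteleev_2 := by
  intro A _ hpre
  unfold Spec_Marbaev_Hagoev_Panteleev_2
  exact pv_main A hpre.1 hpre.2.1
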